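-- pv_equiv track=rewrite | github.com/mindspore-ai/models | research/nlp/hypertext/src/dataset.py | addWordNgrams
-- ===== SOURCE A (Python) =====
-- def addWordNgrams(hash_list, n, bucket):
--     """add word grams"""
--     ngram_hash_list = []
--     len_hash_list = len(hash_list)
--     for index, hash_val in enumerate(hash_list):
--         bound = min(len_hash_list, index + n)
--
--         for i in range(index + 1, bound):
--             hash_val = hash_val * 116049371 + hash_list[i]
--             ngram_hash_list.append(hash_val % bucket)
--
--     return ngram_hash_list
-- ===== SOURCE B (Python) =====
-- def addWordNgrams(hash_list, n, bucket):
--     """add word grams"""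
--     length = len(hash_list)
--     return [
--         sum(hash_list[k] * 116049371 ** (j - k) for k in range(i, j + 1)) % bucket
--         for i in range(length)
--         for j in range(i + 1, min(length, i + n))
--     ]
-- ===== Notes on version B (the rewrite author's own statement) =====
-- stated objective: alternative
-- what changed: Replaces A's nested loops threading one incremental Horner hash accumulator with a flat comprehension that recomputes each window's hash from scratch as an explicit power sum over the window before taking mod bucket.
import Mathlib
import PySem

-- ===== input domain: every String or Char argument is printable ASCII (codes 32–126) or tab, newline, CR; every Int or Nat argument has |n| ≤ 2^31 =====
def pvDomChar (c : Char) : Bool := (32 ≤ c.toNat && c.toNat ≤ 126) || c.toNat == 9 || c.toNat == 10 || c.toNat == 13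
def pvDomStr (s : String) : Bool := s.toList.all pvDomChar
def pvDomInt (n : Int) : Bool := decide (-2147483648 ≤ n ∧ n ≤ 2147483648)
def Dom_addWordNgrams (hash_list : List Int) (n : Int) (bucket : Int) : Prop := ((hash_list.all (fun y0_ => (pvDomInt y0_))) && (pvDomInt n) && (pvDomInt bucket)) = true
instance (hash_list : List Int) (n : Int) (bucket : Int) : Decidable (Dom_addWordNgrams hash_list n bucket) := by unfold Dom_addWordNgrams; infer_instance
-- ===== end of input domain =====

-- B replaces A's threaded incremental (Horner) hash accumulator by a flat comprehension
-- that computes each window's polynomial hash from scratch as an explicit power sum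
-- (objective: alternative decomposition, not faster).

-- ===== PORT A =====
def addWordNgrams (hash_list : List Int) (n : Int) (bucket : Int) : List Int :=
  let ngram_hash_list : List Int := []
  let len_hash_list : Int := hash_list.length
  ((PySem.List.enumerate hash_list).foldl
    (fun acc p =>
      let bound := min len_hash_list (p.1 + n)
      ((PySem.List.pyRange (p.1 + 1) bound 1).foldl
        (fun st i =>
          let hash_val := st.2 * 116049371 + PySem.List.pyGetD hash_list i 0
          (st.1 ++ [PySem.Int.mod hash_val bucket], hash_val))
        (acc, p.2)).1)
    ngram_hash_list)

-- ===== PORT B =====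
def addWordNgrams_alt (hash_list : List Int) (n : Int) (bucket : Int) : List Int :=
  let length : Int := hash_list.length
  (PySem.List.pyRange 0 length 1).flatMap (fun i =>
    (PySem.List.pyRange (i + 1) (min length (i + n)) 1).map (fun j =>
      PySem.Int.mod
        ((PySem.List.pyRange i (j + 1) 1).foldl
          (fun s k => s + PySem.List.pyGetD hash_list k 0 * 116049371 ^ (j - k).toNat) 0)
        bucket))

-- ===== PRECONDITION & SPEC =====
-- Pre_ excludes exactly the inputs where Python A raises ZeroDivisionError (bucket = 0
-- while at least one n-gram is produced, i.e. len ≥ 2 and n ≥ 2); B raises there too.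
def Pre_addWordNgrams (hash_list : List Int) (n : Int) (bucket : Int) : Prop :=
  bucket ≠ 0 ∨ hash_list.length < 2 ∨ n < 2
instance (hash_list : List Int) (n : Int) (bucket : Int) : Decidable (Pre_addWordNgrams hash_list n bucket) := by unfold Pre_addWordNgrams; infer_instance

def pvWitness_addWordNgrams : List Int × Int × Int := ([1, 2, 3], 2, 7)

def Spec_addWordNgrams (hash_list : List Int) (n : Int) (bucket : Int) (out : List Int) : Prop := out = addWordNgrams_alt hash_list n bucket
instance (hash_list : List Int) (n : Int) (bucket : Int) (out : List Int) : Decidable (Spec_addWordNgrams hash_list n bucket out) := by unfold Spec_addWordNgrams; infer_instance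

-- ===== CLAIM (what is proved, stated in full; the proofs are below) =====
def Claim_equal_addWordNgrams : Prop := ∀ (hash_list : List Int) (n : Int) (bucket : Int), Dom_addWordNgrams hash_list n bucket → Pre_addWordNgrams hash_list n bucket → Spec_addWordNgrams hash_list n bucket (addWordNgrams hash_list n bucket)

-- ===== LEMMAS AND PROOFS =====

-- B's per-window power-sum hash for the window [i..j] of h.
def pvS (h : List Int) (i j : Int) : Int :=
  (PySem.List.pyRange i (j + 1) 1).foldl
    (fun s k => s + PySem.List.pyGetD h k 0 * 116049371 ^ (j - k).toNat) 0

theorem pvS_sum (h : List Int) (i j : Int) :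
    pvS h i j = ((PySem.List.pyRange i (j + 1) 1).map
      (fun k => PySem.List.pyGetD h k 0 * 116049371 ^ (j - k).toNat)).sum := by
  simp [pvS, PySem.List.foldl_add]

theorem pvS_self (h : List Int) (i : Int) : pvS h i i = PySem.List.pyGetD h i 0 := by
  simp [pvS, PySem.List.pyRange_one_singleton]

theorem pvS_succ (h : List Int) (i j : Int) (hij : i ≤ j) :
    pvS h i (j + 1) = pvS h i j * 116049371 + PySem.List.pyGetD h (j + 1) 0 := by
  rw [pvS_sum, pvS_sum, PySem.List.pyRange_one_succ_right (by omega : i ≤ j + 1)]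
  rw [List.map_append, List.sum_append]
  have hmap : (PySem.List.pyRange i (j + 1) 1).map
      (fun k => PySem.List.pyGetD h k 0 * 116049371 ^ (j + 1 - k).toNat)
      = (PySem.List.pyRange i (j + 1) 1).map
      (fun k => PySem.List.pyGetD h k 0 * 116049371 ^ (j - k).toNat * 116049371) := by
    apply List.map_congr_left
    intro k hk
    rw [PySem.List.mem_pyRange_one] at hk
    have he : (j + 1 - k).toNat = (j - k).toNat + 1 := by omega
    rw [he, pow_succ]; ring
  rw [hmap, List.sum_map_mul_right]
  simp

-- A's inner loop, started from the window head's hash, produces exactly B's per-window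
-- mods and carries pvS as its running hash.
theorem pvInner (h : List Int) (bucket i : Int) (t : Nat) (acc : List Int) :
    (PySem.List.pyRange (i + 1) (i + 1 + (t : Int)) 1).foldl
      (fun st k =>
        (st.1 ++ [PySem.Int.mod (st.2 * 116049371 + PySem.List.pyGetD h k 0) bucket],
         st.2 * 116049371 + PySem.List.pyGetD h k 0))
      (acc, pvS h i i)
    = (acc ++ (PySem.List.pyRange (i + 1) (i + 1 + (t : Int)) 1).map
        (fun j => PySem.Int.mod (pvS h i j) bucket),
       pvS h i (i + (t : Int))) := by
  induction t with
  | zero => simp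
  | succ t ih =>
      have hb : i + 1 + ((t : Int) + 1) = (i + 1 + (t : Int)) + 1 := by ring
      push_cast
      rw [hb, PySem.List.pyRange_one_succ_right (by omega : i + 1 ≤ i + 1 + (t : Int))]
      rw [List.foldl_append, ih, List.map_append]
      have hs : pvS h i (i + (t : Int)) * 116049371 + PySem.List.pyGetD h (i + 1 + (t : Int)) 0
          = pvS h i (i + (t : Int) + 1) := by
        rw [pvS_succ h i (i + (t : Int)) (by omega)]
        ring_nf
      simp only [List.foldl_cons, List.foldl_nil, List.map_cons, List.map_nil, hs]
      rw [show i + 1 + (t : Int) = i + (t : Int) + 1 by ring,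
          show i + ((t : Int) + 1) = i + (t : Int) + 1 by ring, List.append_assoc]

-- One full body of A's outer loop equals appending B's list for that start index.
theorem pvOuterStep (h : List Int) (n bucket i : Int) (acc : List Int) :
    ((PySem.List.pyRange (i + 1) (min (h.length : Int) (i + n)) 1).foldl
      (fun st k =>
        (st.1 ++ [PySem.Int.mod (st.2 * 116049371 + PySem.List.pyGetD h k 0) bucket],
         st.2 * 116049371 + PySem.List.pyGetD h k 0))
      (acc, PySem.List.pyGetD h i 0)).1
    = acc ++ (PySem.List.pyRange (i + 1) (min (h.length : Int) (i + n)) 1).map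
        (fun j => PySem.Int.mod (pvS h i j) bucket) := by
  set b := min (h.length : Int) (i + n) with hbdef
  by_cases hle : b ≤ i + 1
  · rw [PySem.List.pyRange_one_eq_nil hle]; simp
  · have ht : b = i + 1 + ((b - (i + 1)).toNat : Int) := by omega
    rw [ht, ← pvS_self h i, pvInner h bucket i ((b - (i + 1)).toNat) acc]

theorem addWordNgrams_eq (hash_list : List Int) (n : Int) (bucket : Int) :
    addWordNgrams hash_list n bucket = addWordNgrams_alt hash_list n bucket := by
  unfold addWordNgrams addWordNgrams_alt
  rw [PySem.List.enumerate_eq_map_pyRange hash_list 0, List.foldl_map]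
  have hlen : PySem.List.len hash_list = (hash_list.length : Int) := rfl
  rw [hlen]
  rw [PySem.List.foldl_congr_mem _ _
    (fun acc i => acc ++ (PySem.List.pyRange (i + 1) (min (hash_list.length : Int) (i + n)) 1).map
        (fun j => PySem.Int.mod (pvS hash_list i j) bucket)) []
    (by intro acc i _; exact pvOuterStep hash_list n bucket i acc)]
  rw [PySem.List.foldl_append_eq_flatMap]
  rfl

-- ===== VERDICT (by name: the statement is the Claim_ definition above) =====
theorem addWordNgrams_spec : Claim_equal_addWordNgrams := by
  intro hash_list n bucket _ _
  exact addWordNgrams_eq hash_list n bucket
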